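-- pv_equiv track=rewrite | github.com/akfamily/akshare | venv/Lib/site-packages/mplfinance/_utils.py | combine_adjacent
-- ===== SOURCE A (Python) =====
-- def combine_adjacent(arr):
--     """Sum like signed adjacent elements
--     arr : starting array
--
--     Returns
--     -------
--     output: new summed array
--     indexes: indexes indicating the first
--              element summed for each group in arr
--     """
--     output, indexes = [], []
--     curr_i = 0
--     while len(arr) > 0:
--         curr_sign = arr[0]/abs(arr[0])
--         index = 0
--         while index < len(arr) and arr[index]/abs(arr[index]) == curr_sign:
--             index += 1
--         output.append(sum(arr[:index]))
--         indexes.append(curr_i)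
--         curr_i += index
--
--         for _ in range(index):
--             arr.pop(0)
--     return output, indexes
-- ===== SOURCE B (Python) =====
-- def combine_adjacent(arr):
--     """Single forward pass: flush the running sum whenever the sign changes.
--     (Unlike A, does not mutate arr; equivalence is about the return value.)"""
--     if not arr:
--         return [], []
--     output, indexes = [], []
--     run, start = arr[0], 0
--     for i in range(1, len(arr)):
--         x = arr[i]
--         if (x > 0) == (arr[i - 1] > 0):
--             run += x
--         else:
--             output.append(run)
--             indexes.append(start)
--             run, start = x, i
--     output.append(run)
--     indexes.append(start)
--     return output, indexes
-- ===== Notes on version B (the rewrite author's own statement) =====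
-- stated objective: faster
-- what changed: Replaced A's outer rescan that slices, sums and pops the same-signed prefix via repeated arr.pop(0) (O(n^2)) with a single forward pass that compares each element's sign with its predecessor's and flushes a running sum and start index on each sign change (O(n)); B does not mutate arr, while A empties it in place.
import Mathlib
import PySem

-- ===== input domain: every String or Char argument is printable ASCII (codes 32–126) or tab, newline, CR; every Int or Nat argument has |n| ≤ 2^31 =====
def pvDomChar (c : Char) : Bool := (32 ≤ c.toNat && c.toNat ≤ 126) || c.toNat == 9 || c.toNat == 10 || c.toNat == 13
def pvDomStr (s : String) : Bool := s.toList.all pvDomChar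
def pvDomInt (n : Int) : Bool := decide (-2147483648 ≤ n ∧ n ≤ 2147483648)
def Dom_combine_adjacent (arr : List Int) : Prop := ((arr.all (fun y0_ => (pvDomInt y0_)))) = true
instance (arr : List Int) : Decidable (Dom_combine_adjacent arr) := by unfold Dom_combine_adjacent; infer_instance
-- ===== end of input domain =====

-- B replaces A's quadratic group-scan with repeated pop(0) by one linear pass flushing a
-- running sum on sign change (objective: faster). A also empties its argument in place;
-- B does not mutate it — the equivalence proved here is about the RETURN value only.

-- ===== PORT A =====
-- Python's arr[k]/abs(arr[k]) is ±1.0 for nonzero ints (0 raises, excluded by Pre_);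
-- it is ported as the integer sign 'if y > 0 then 1 else -1', exact on Pre_.
-- The inner while-scan computes index = length of the same-signed prefix (takeWhile);
-- 'sum(arr[:index])' is that prefix's sum and the index pops of arr[0] leave 'dropWhile'.
-- the sign comparison arr[index]/abs(arr[index]) == curr_sign from A's inner while
def sameSign (x y : Int) : Bool :=
  (if y > 0 then (1 : Int) else -1) == (if x > 0 then (1 : Int) else -1)

def aGo : List Int → Int → List Int × List Int
  | [], _ => ([], [])
  | x :: t, curr_i =>
    let p : Int → Bool := sameSign x
    let grp := (x :: t).takeWhile p
    let rest := (x :: t).dropWhile p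
    let res := aGo rest (curr_i + grp.length)
    (grp.sum :: res.1, curr_i :: res.2)
  termination_by l _ => l.length
  decreasing_by
    simp [List.dropWhile, sameSign]
    exact List.length_dropWhile_le _ t

def combine_adjacent (arr : List Int) : List Int × List Int := aGo arr 0

-- ===== PORT B =====
-- one pass: compare each element's sign with its predecessor's, flush run/start on change
def altGo : List Int → Int → Int → Int → Int → List Int → List Int → List Int × List Int
  | [], _, run, start, _, out, idx => (out ++ [run], idx ++ [start])
  | x :: t, prev, run, start, i, out, idx =>
    if (decide (0 < x)) = (decide (0 < prev)) then
      altGo t x (run + x) start (i + 1) out idx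
    else
      altGo t x x i (i + 1) (out ++ [run]) (idx ++ [start])

def combine_adjacent_alt (arr : List Int) : List Int × List Int :=
  match arr with
  | [] => ([], [])
  | x :: t => altGo t x x 0 1 [] []

-- ===== PRECONDITION & SPEC =====
-- Pre_ excludes arrays containing 0: there Python A raises ZeroDivisionError (0/abs(0)).
def Pre_combine_adjacent (arr : List Int) : Prop := ∀ x ∈ arr, x ≠ 0
instance (arr : List Int) : Decidable (Pre_combine_adjacent arr) := by
  unfold Pre_combine_adjacent; infer_instance
def pvWitness_combine_adjacent : List Int := [1, 2, -3, 5]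
def Spec_combine_adjacent (arr : List Int) (out : List Int × List Int) : Prop := out = combine_adjacent_alt arr
instance (arr : List Int) (out : List Int × List Int) : Decidable (Spec_combine_adjacent arr out) := by unfold Spec_combine_adjacent; infer_instance

-- ===== CLAIM (what is proved, stated in full; the proofs are below) =====
def Claim_equal_combine_adjacent : Prop := ∀ (arr : List Int), Dom_combine_adjacent arr → Pre_combine_adjacent arr → Spec_combine_adjacent arr (combine_adjacent arr)

-- ===== LEMMAS AND PROOFS =====

-- A's ±1-sign comparison agrees with B's boolean positivity comparison
theorem sign_pred_eq (x : Int) :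
    sameSign x = (fun y => decide (0 < y) == decide (0 < x)) := by
  funext y
  by_cases hy : 0 < y <;> by_cases hx : 0 < x <;> simp [sameSign, hy, hx]

theorem alt_go_eq (t : List Int) (prev run start i : Int) (out idx : List Int) :
    altGo t prev run start i out idx =
      ((out ++ [run + (t.takeWhile (fun y => decide (0 < y) == decide (0 < prev))).sum])
          ++ (aGo (t.dropWhile (fun y => decide (0 < y) == decide (0 < prev)))
                (i + (t.takeWhile (fun y => decide (0 < y) == decide (0 < prev))).length)).1,
       (idx ++ [start])
          ++ (aGo (t.dropWhile (fun y => decide (0 < y) == decide (0 < prev)))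
                (i + (t.takeWhile (fun y => decide (0 < y) == decide (0 < prev))).length)).2) := by
  induction t generalizing prev run start i out idx with
  | nil =>
      simp [altGo, aGo.eq_def]
  | cons x t ih =>
      by_cases h : decide (0 < x) = decide (0 < prev)
      · rw [altGo]
        simp only [if_pos h]
        rw [ih]
        simp only [← h, List.takeWhile_cons, List.dropWhile_cons]
        simp
        refine ⟨⟨by ring, ?_⟩, ?_⟩ <;>
          · congr 1
            ring_nf
      · have hb : (decide (0 < x) == decide (0 < prev)) = false := by
          simpa using h
        rw [altGo]
        simp only [if_neg h]
        rw [ih]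
        simp only [List.takeWhile, List.dropWhile, hb]
        conv_rhs => rw [aGo.eq_def]
        simp only [sign_pred_eq x]
        simp [List.takeWhile, List.dropWhile]
        constructor <;> ring_nf

-- ===== VERDICT (by name: the statement is the Claim_ definition above) =====
theorem combine_adjacent_spec : Claim_equal_combine_adjacent := by
  intro arr _ _
  unfold Spec_combine_adjacent
  match arr with
  | [] => simp [combine_adjacent, combine_adjacent_alt, aGo.eq_def]
  | x :: t =>
      show aGo (x :: t) 0 = altGo t x x 0 1 [] []
      rw [alt_go_eq]
      conv_lhs => rw [aGo.eq_def]
      simp only [sign_pred_eq x]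
      simp [List.takeWhile, List.dropWhile]
      exact ⟨by rw [Int.add_comm], by rw [Int.add_comm]⟩
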